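-- pv_equiv track=rewrite | github.com/chrishayuk/chuk-code-raptor | examples/parsing/markdown_parsing_demo.py | detect_markdown_semantic_type
-- ===== SOURCE A (Python) =====
-- from typing import Dict, List, Any
--
-- def detect_markdown_semantic_type(tags: List[str], content: str) -> str:
--     """Detect the semantic type of a Markdown chunk"""
--     content_lower = content.lower()
--
--     if 'heading' in tags:
--         return 'Heading'
--     elif 'code_block' in tags or 'code' in tags:
--         return 'Code Block'
--     elif 'table' in tags or 'tabular_data' in tags:
--         return 'Table'
--     elif 'list' in tags:
--         return 'List Content'
--     elif 'blockquote' in tags or 'quote' in tags: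
--         return 'Blockquote'
--     elif 'paragraph' in tags:
--         return 'Paragraph'
--     elif any(keyword in content_lower for keyword in ['api', 'endpoint', 'method']):
--         return 'API Documentation'
--     elif any(keyword in content_lower for keyword in ['config', 'settings', 'yaml', 'json']):
--         return 'Configuration'
--     elif any(keyword in content_lower for keyword in ['install', 'setup', 'usage']):
--         return 'Instructions'
--     elif any(keyword in content_lower for keyword in ['example', 'demo', 'tutorial']):
--         return 'Example'
--     elif any(keyword in content_lower for keyword in ['error', 'troubleshoot', 'debug']):
--         return 'Troubleshooting'
--     else:
--         return 'Generic Content'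
-- ===== SOURCE B (Python) =====
-- # B: min-rank reduction — every tag/keyword carries a priority number; the answer
-- # is the label of the smallest priority seen (tags 0-5, keywords 6-10, default 11).
-- TAG_RANK = {
--     'heading': 0, 'code_block': 1, 'code': 1, 'table': 2, 'tabular_data': 2,
--     'list': 3, 'blockquote': 4, 'quote': 4, 'paragraph': 5,
-- }
-- KW_RANK = {
--     'api': 6, 'endpoint': 6, 'method': 6,
--     'config': 7, 'settings': 7, 'yaml': 7, 'json': 7,
--     'install': 8, 'setup': 8, 'usage': 8,
--     'example': 9, 'demo': 9, 'tutorial': 9,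
--     'error': 10, 'troubleshoot': 10, 'debug': 10,
-- }
-- RESULTS = ['Heading', 'Code Block', 'Table', 'List Content', 'Blockquote',
--            'Paragraph', 'API Documentation', 'Configuration', 'Instructions',
--            'Example', 'Troubleshooting', 'Generic Content']
--
-- def detect_markdown_semantic_type(tags, content):
--     best = 11
--     for t in tags:
--         best = min(best, TAG_RANK.get(t, 11))
--     if best == 11:
--         content_lower = content.lower()
--         for kw, p in KW_RANK.items():
--             if kw in content_lower:
--                 best = min(best, p)
--     return RESULTS[best]
-- ===== Notes on version B (the rewrite author's own statement) =====
-- stated objective: alternative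
-- what changed: Replaced the 11-branch first-match if/elif chain by a numeric min-reduction: each tag/keyword maps to a priority rank, the minimum rank seen over all tags (then all keywords) indexes a results table.
import Mathlib
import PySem

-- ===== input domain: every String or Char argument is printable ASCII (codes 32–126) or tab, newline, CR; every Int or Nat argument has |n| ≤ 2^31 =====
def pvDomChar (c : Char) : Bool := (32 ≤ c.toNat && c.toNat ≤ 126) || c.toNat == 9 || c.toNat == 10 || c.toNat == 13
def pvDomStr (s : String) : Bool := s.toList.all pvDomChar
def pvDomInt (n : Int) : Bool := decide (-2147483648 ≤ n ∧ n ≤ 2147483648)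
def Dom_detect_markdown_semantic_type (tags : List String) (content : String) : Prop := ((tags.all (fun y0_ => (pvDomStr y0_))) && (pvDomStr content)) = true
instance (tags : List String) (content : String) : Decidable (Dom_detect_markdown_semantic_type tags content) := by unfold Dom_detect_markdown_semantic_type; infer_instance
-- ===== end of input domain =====

-- B replaces the first-match if/elif chain by a min-rank reduction into a results table (alternative decomposition, same cost).

-- ===== PORT A =====
def detect_markdown_semantic_type (tags : List String) (content : String) : String :=
  let content_lower := PySem.Str.lower content
  if tags.contains "heading" then "Heading"
  else if tags.contains "code_block" || tags.contains "code" then "Code Block"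
  else if tags.contains "table" || tags.contains "tabular_data" then "Table"
  else if tags.contains "list" then "List Content"
  else if tags.contains "blockquote" || tags.contains "quote" then "Blockquote"
  else if tags.contains "paragraph" then "Paragraph"
  else if ["api", "endpoint", "method"].any (fun k => PySem.Str.isIn k content_lower) then "API Documentation"
  else if ["config", "settings", "yaml", "json"].any (fun k => PySem.Str.isIn k content_lower) then "Configuration"
  else if ["install", "setup", "usage"].any (fun k => PySem.Str.isIn k content_lower) then "Instructions"
  else if ["example", "demo", "tutorial"].any (fun k => PySem.Str.isIn k content_lower) then "Example"
  else if ["error", "troubleshoot", "debug"].any (fun k => PySem.Str.isIn k content_lower) then "Troubleshooting"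
  else "Generic Content"

-- ===== PORT B =====
-- TAG_RANK.get(t, 11): the literal dict of Source B ported as a lookup by cases (exact: all keys distinct)
def pvTagRank (t : String) : Nat :=
  if t = "heading" then 0
  else if t = "code_block" then 1 else if t = "code" then 1
  else if t = "table" then 2 else if t = "tabular_data" then 2
  else if t = "list" then 3
  else if t = "blockquote" then 4 else if t = "quote" then 4
  else if t = "paragraph" then 5
  else 11

-- KW_RANK.items() in insertion order
def pvKwRank : List (String × Nat) :=
  [("api", 6), ("endpoint", 6), ("method", 6),
   ("config", 7), ("settings", 7), ("yaml", 7), ("json", 7),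
   ("install", 8), ("setup", 8), ("usage", 8),
   ("example", 9), ("demo", 9), ("tutorial", 9),
   ("error", 10), ("troubleshoot", 10), ("debug", 10)]

def pvResults : List String :=
  ["Heading", "Code Block", "Table", "List Content", "Blockquote", "Paragraph",
   "API Documentation", "Configuration", "Instructions", "Example",
   "Troubleshooting", "Generic Content"]

def detect_markdown_semantic_type_alt (tags : List String) (content : String) : String :=
  let best1 := tags.foldl (fun b t => min b (pvTagRank t)) 11
  let best :=
    if best1 = 11 then
      let content_lower := PySem.Str.lower content
      pvKwRank.foldl (fun b kp => if PySem.Str.isIn kp.1 content_lower then min b kp.2 else b) best1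
    else best1
  pvResults.getD best "Generic Content"  -- RESULTS[best]; best ≤ 11 always, so the default is never used

-- ===== PRECONDITION & SPEC =====
def Spec_detect_markdown_semantic_type (tags : List String) (content : String) (out : String) : Prop := out = detect_markdown_semantic_type_alt tags content
instance (tags : List String) (content : String) (out : String) : Decidable (Spec_detect_markdown_semantic_type tags content out) := by unfold Spec_detect_markdown_semantic_type; infer_instance

-- ===== CLAIM (what is proved, stated in full; the proofs are below) =====
def Claim_equal_detect_markdown_semantic_type : Prop := ∀ (tags : List String) (content : String), Dom_detect_markdown_semantic_type tags content → Spec_detect_markdown_semantic_type tags content (detect_markdown_semantic_type tags content)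

-- ===== LEMMAS AND PROOFS =====

-- the tag-membership chain value that the min-fold over tags computes
def pvChain (tags : List String) : Nat :=
  if tags.contains "heading" then 0
  else if tags.contains "code_block" || tags.contains "code" then 1
  else if tags.contains "table" || tags.contains "tabular_data" then 2
  else if tags.contains "list" then 3
  else if tags.contains "blockquote" || tags.contains "quote" then 4
  else if tags.contains "paragraph" then 5
  else 11

lemma pvChain_cons (t : String) (ts : List String) :
    pvChain (t :: ts) = min (pvTagRank t) (pvChain ts) := by
  unfold pvChain pvTagRank
  simp only [List.contains_cons]
  by_cases h0 : t = "heading"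
  · subst h0
    generalize ts.contains "heading" = c0
    generalize ts.contains "code_block" = c1
    generalize ts.contains "code" = c2
    generalize ts.contains "table" = c3
    generalize ts.contains "tabular_data" = c4
    generalize ts.contains "list" = c5
    generalize ts.contains "blockquote" = c6
    generalize ts.contains "quote" = c7
    generalize ts.contains "paragraph" = c8
    revert c0 c1 c2 c3 c4 c5 c6 c7 c8; decide
  by_cases h1 : t = "code_block"
  · subst h1
    generalize ts.contains "heading" = c0
    generalize ts.contains "code_block" = c1
    generalize ts.contains "code" = c2
    generalize ts.contains "table" = c3
    generalize ts.contains "tabular_data" = c4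
    generalize ts.contains "list" = c5
    generalize ts.contains "blockquote" = c6
    generalize ts.contains "quote" = c7
    generalize ts.contains "paragraph" = c8
    revert c0 c1 c2 c3 c4 c5 c6 c7 c8; decide
  by_cases h2 : t = "code"
  · subst h2
    generalize ts.contains "heading" = c0
    generalize ts.contains "code_block" = c1
    generalize ts.contains "code" = c2
    generalize ts.contains "table" = c3
    generalize ts.contains "tabular_data" = c4
    generalize ts.contains "list" = c5
    generalize ts.contains "blockquote" = c6
    generalize ts.contains "quote" = c7
    generalize ts.contains "paragraph" = c8
    revert c0 c1 c2 c3 c4 c5 c6 c7 c8; decide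
  by_cases h3 : t = "table"
  · subst h3
    generalize ts.contains "heading" = c0
    generalize ts.contains "code_block" = c1
    generalize ts.contains "code" = c2
    generalize ts.contains "table" = c3
    generalize ts.contains "tabular_data" = c4
    generalize ts.contains "list" = c5
    generalize ts.contains "blockquote" = c6
    generalize ts.contains "quote" = c7
    generalize ts.contains "paragraph" = c8
    revert c0 c1 c2 c3 c4 c5 c6 c7 c8; decide
  by_cases h4 : t = "tabular_data"
  · subst h4
    generalize ts.contains "heading" = c0
    generalize ts.contains "code_block" = c1
    generalize ts.contains "code" = c2
    generalize ts.contains "table" = c3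
    generalize ts.contains "tabular_data" = c4
    generalize ts.contains "list" = c5
    generalize ts.contains "blockquote" = c6
    generalize ts.contains "quote" = c7
    generalize ts.contains "paragraph" = c8
    revert c0 c1 c2 c3 c4 c5 c6 c7 c8; decide
  by_cases h5 : t = "list"
  · subst h5
    generalize ts.contains "heading" = c0
    generalize ts.contains "code_block" = c1
    generalize ts.contains "code" = c2
    generalize ts.contains "table" = c3
    generalize ts.contains "tabular_data" = c4
    generalize ts.contains "list" = c5
    generalize ts.contains "blockquote" = c6
    generalize ts.contains "quote" = c7
    generalize ts.contains "paragraph" = c8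
    revert c0 c1 c2 c3 c4 c5 c6 c7 c8; decide
  by_cases h6 : t = "blockquote"
  · subst h6
    generalize ts.contains "heading" = c0
    generalize ts.contains "code_block" = c1
    generalize ts.contains "code" = c2
    generalize ts.contains "table" = c3
    generalize ts.contains "tabular_data" = c4
    generalize ts.contains "list" = c5
    generalize ts.contains "blockquote" = c6
    generalize ts.contains "quote" = c7
    generalize ts.contains "paragraph" = c8
    revert c0 c1 c2 c3 c4 c5 c6 c7 c8; decide
  by_cases h7 : t = "quote"
  · subst h7
    generalize ts.contains "heading" = c0
    generalize ts.contains "code_block" = c1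
    generalize ts.contains "code" = c2
    generalize ts.contains "table" = c3
    generalize ts.contains "tabular_data" = c4
    generalize ts.contains "list" = c5
    generalize ts.contains "blockquote" = c6
    generalize ts.contains "quote" = c7
    generalize ts.contains "paragraph" = c8
    revert c0 c1 c2 c3 c4 c5 c6 c7 c8; decide
  by_cases h8 : t = "paragraph"
  · subst h8
    generalize ts.contains "heading" = c0
    generalize ts.contains "code_block" = c1
    generalize ts.contains "code" = c2
    generalize ts.contains "table" = c3
    generalize ts.contains "tabular_data" = c4
    generalize ts.contains "list" = c5
    generalize ts.contains "blockquote" = c6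
    generalize ts.contains "quote" = c7
    generalize ts.contains "paragraph" = c8
    revert c0 c1 c2 c3 c4 c5 c6 c7 c8; decide
  · rw [show ("heading" == t) = false from beq_eq_false_iff_ne.mpr (fun h => h0 h.symm),
        show ("code_block" == t) = false from beq_eq_false_iff_ne.mpr (fun h => h1 h.symm),
        show ("code" == t) = false from beq_eq_false_iff_ne.mpr (fun h => h2 h.symm),
        show ("table" == t) = false from beq_eq_false_iff_ne.mpr (fun h => h3 h.symm),
        show ("tabular_data" == t) = false from beq_eq_false_iff_ne.mpr (fun h => h4 h.symm),
        show ("list" == t) = false from beq_eq_false_iff_ne.mpr (fun h => h5 h.symm),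
        show ("blockquote" == t) = false from beq_eq_false_iff_ne.mpr (fun h => h6 h.symm),
        show ("quote" == t) = false from beq_eq_false_iff_ne.mpr (fun h => h7 h.symm),
        show ("paragraph" == t) = false from beq_eq_false_iff_ne.mpr (fun h => h8 h.symm)]
    generalize ts.contains "heading" = c0
    generalize ts.contains "code_block" = c1
    generalize ts.contains "code" = c2
    generalize ts.contains "table" = c3
    generalize ts.contains "tabular_data" = c4
    generalize ts.contains "list" = c5
    generalize ts.contains "blockquote" = c6
    generalize ts.contains "quote" = c7
    generalize ts.contains "paragraph" = c8
    simp only [h0, h1, h2, h3, h4, h5, h6, h7, h8, if_false]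
    revert c0 c1 c2 c3 c4 c5 c6 c7 c8; decide

lemma pvChain_le (tags : List String) : pvChain tags ≤ 11 := by
  unfold pvChain; split_ifs <;> omega

lemma tagFold_eq (tags : List String) (b : Nat) (hb : b ≤ 11) :
    tags.foldl (fun b t => min b (pvTagRank t)) b = min b (pvChain tags) := by
  induction tags generalizing b with
  | nil => simp [pvChain]; omega
  | cons t ts ih =>
      have h1 : min b (pvTagRank t) ≤ 11 := by omega
      simp only [List.foldl_cons, ih _ h1, pvChain_cons]
      omega

lemma kwGroup (cl : String) (p : Nat) (keys : List String) (b : Nat) :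
    (keys.map (fun k => (k, p))).foldl
        (fun b kp => if PySem.Str.isIn kp.1 cl then min b kp.2 else b) b
      = if keys.any (fun k => PySem.Str.isIn k cl) then min b p else b := by
  induction keys generalizing b with
  | nil => simp
  | cons k ks ih =>
      simp only [List.map_cons, List.foldl_cons, List.any_cons]
      rw [ih]
      split_ifs <;> simp_all
      all_goals (exfalso; rename_i h1 h2 h3; obtain ⟨x, hx, hx2⟩ := h3; exact absurd (h1 x hx) (by simp [hx2]))

lemma kwSplit : pvKwRank =
    (["api", "endpoint", "method"].map (fun k => (k, 6))) ++
    (["config", "settings", "yaml", "json"].map (fun k => (k, 7))) ++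
    (["install", "setup", "usage"].map (fun k => (k, 8))) ++
    (["example", "demo", "tutorial"].map (fun k => (k, 9))) ++
    (["error", "troubleshoot", "debug"].map (fun k => (k, 10))) := rfl

lemma kwFold_eq (cl : String) :
    pvKwRank.foldl (fun b kp => if PySem.Str.isIn kp.1 cl then min b kp.2 else b) 11 =
      (if ["api", "endpoint", "method"].any (fun k => PySem.Str.isIn k cl) then 6
       else if ["config", "settings", "yaml", "json"].any (fun k => PySem.Str.isIn k cl) then 7
       else if ["install", "setup", "usage"].any (fun k => PySem.Str.isIn k cl) then 8
       else if ["example", "demo", "tutorial"].any (fun k => PySem.Str.isIn k cl) then 9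
       else if ["error", "troubleshoot", "debug"].any (fun k => PySem.Str.isIn k cl) then 10
       else 11) := by
  rw [kwSplit, List.foldl_append, List.foldl_append, List.foldl_append, List.foldl_append,
      kwGroup, kwGroup, kwGroup, kwGroup, kwGroup]
  split_ifs <;> omega

-- ===== VERDICT (by name: the statement is the Claim_ definition above) =====
set_option maxHeartbeats 1000000 in
theorem detect_markdown_semantic_type_spec : Claim_equal_detect_markdown_semantic_type := by
  intro tags content _
  have h11 : min 11 (pvChain tags) = pvChain tags := by have := pvChain_le tags; omega
  unfold Spec_detect_markdown_semantic_type detect_markdown_semantic_type detect_markdown_semantic_type_alt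
  simp only [tagFold_eq tags 11 (le_refl 11), h11]
  by_cases hb : pvChain tags = 11
  · simp only [hb, kwFold_eq]
    
    unfold pvChain at hb
    split_ifs at hb <;> try omega
    split_ifs <;> simp_all [pvResults]
  · simp only [if_neg hb]
    unfold pvChain at hb ⊢
    split_ifs <;> simp_all [pvResults]
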